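-- pv_equiv track=rewrite | github.com/parvathyhdas/quiz-bot | core/reply_factory.py | get_next_question
-- ===== SOURCE A (Python) =====
-- def get_next_question(current_question_id):
--     '''
--     Fetches the next question from the PYTHON_QUESTION_LIST based on the current_question_id.
--     '''
--
--     PYTHON_QUESTION_LIST = [
--         {"id": 1, "question": "What is Python?"},
--         {"id": 2, "question": "What are Python modules?"},
--         {"id": 3, "question": "What is PEP 8?"},
--         # Add more questions as needed
--     ]
--
--     current_question_id = int(current_question_id)
--     for index, question in enumerate(PYTHON_QUESTION_LIST):
--         if question["id"] == current_question_id: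
--             if index + 1 < len(PYTHON_QUESTION_LIST):
--                 next_question = PYTHON_QUESTION_LIST[index + 1]
--                 return next_question["question"], next_question["id"]
--
--     return "No more questions", -1
-- ===== SOURCE B (Python) =====
-- _NEXT_MAP = {
--     1: ("What are Python modules?", 2),
--     2: ("What is PEP 8?", 3),
-- }
--
-- def get_next_question(current_question_id):
--     current_question_id = int(current_question_id)
--     return _NEXT_MAP.get(current_question_id, ("No more questions", -1))
-- ===== Notes on version B (the rewrite author's own statement) =====
-- stated objective: idiomatic
-- what changed: Replaces the enumerate scan with its index+1 bounds check and neighbour indexing by a precomputed successor dict mapping each id directly to (next question, next id), making the function a single constant-time lookup with a default.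
import Mathlib
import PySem

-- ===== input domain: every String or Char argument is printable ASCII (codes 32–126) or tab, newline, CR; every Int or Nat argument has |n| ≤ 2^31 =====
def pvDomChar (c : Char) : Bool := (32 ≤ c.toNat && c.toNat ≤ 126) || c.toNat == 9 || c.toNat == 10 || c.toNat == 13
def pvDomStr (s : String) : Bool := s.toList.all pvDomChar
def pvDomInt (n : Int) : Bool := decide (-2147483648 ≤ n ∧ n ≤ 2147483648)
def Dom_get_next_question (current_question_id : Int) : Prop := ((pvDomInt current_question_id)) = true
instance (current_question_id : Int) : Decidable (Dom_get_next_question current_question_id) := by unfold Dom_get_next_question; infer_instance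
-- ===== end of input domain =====

-- B replaces A's enumerate scan (with its index+1 bounds check and neighbour indexing)
-- by a precomputed successor dict: a single lookup with a default (idiomatic).

-- ===== PORT A =====
-- the question list: (id, question) pairs, as dict literals reduced to the two used fields
def pyQuestionList : List (Int × String) :=
  [(1, "What is Python?"), (2, "What are Python modules?"), (3, "What is PEP 8?")]

-- the 'for index, question in enumerate(...)' loop; falls through to the default return
def gnqLoop (cid : Int) : List (Int × (Int × String)) → String × Int
  | [] => ("No more questions", -1)
  | (index, q) :: rest =>
    if q.1 == cid then
      if index + 1 < (pyQuestionList.length : Int) then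
        match PySem.List.pyGet? pyQuestionList (index + 1) with
        | some nq => (nq.2, nq.1)
        | none => gnqLoop cid rest   -- unreachable: index+1 is in range
      else gnqLoop cid rest
    else gnqLoop cid rest

def get_next_question (current_question_id : Int) : String × Int :=
  gnqLoop current_question_id (PySem.List.enumerate pyQuestionList)

-- ===== PORT B =====
def nextMap : PySem.Dict Int (String × Int) :=
  PySem.Dict.ofList [(1, ("What are Python modules?", 2)), (2, ("What is PEP 8?", 3))]

def get_next_question_alt (current_question_id : Int) : String × Int :=
  nextMap.getD current_question_id ("No more questions", -1)

-- ===== PRECONDITION & SPEC =====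
def Spec_get_next_question (current_question_id : Int) (out : String × Int) : Prop := out = get_next_question_alt current_question_id
instance (current_question_id : Int) (out : String × Int) : Decidable (Spec_get_next_question current_question_id out) := by unfold Spec_get_next_question; infer_instance

-- ===== CLAIM (what is proved, stated in full; the proofs are below) =====
def Claim_equal_get_next_question : Prop := ∀ (current_question_id : Int), Dom_get_next_question current_question_id → Spec_get_next_question current_question_id (get_next_question current_question_id)

-- ===== LEMMAS AND PROOFS =====

-- ===== VERDICT (by name: the statement is the Claim_ definition above) =====
theorem get_next_question_spec : Claim_equal_get_next_question := by
  intro n _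
  unfold Spec_get_next_question get_next_question get_next_question_alt
  by_cases h1 : n = 1
  · subst h1; decide
  · by_cases h2 : n = 2
    · subst h2; decide
    · by_cases h3 : n = 3
      · subst h3; decide
      · rw [show nextMap = PySem.Dict.mk
              [(1, ("What are Python modules?", 2)), (2, ("What is PEP 8?", 3))] from rfl]
        simp [gnqLoop, pyQuestionList, PySem.List.enumerate, PySem.Dict.getD,
              PySem.Dict.get?,
              show (1 : Int) ≠ n from fun h => h1 h.symm,
              show (2 : Int) ≠ n from fun h => h2 h.symm,
              show (3 : Int) ≠ n from fun h => h3 h.symm]
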